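-- pv_equiv track=rewrite | github.com/Carnot-EBM/carnot-ebm | scripts/experiment_40_llm_ising_bridge.py | decode_coloring
-- ===== SOURCE A (Python) =====
-- def decode_coloring(spins: list[bool], n_nodes: int, n_colors: int) -> dict[int, int]:
--     """Decode spin assignment back to graph coloring."""
--     coloring = {}
--     for node in range(n_nodes):
--         colors_active = []
--         for c in range(n_colors):
--             if spins[node * n_colors + c]:
--                 colors_active.append(c)
--         if colors_active:
--             coloring[node] = colors_active[0]  # Take first active color
--         else:
--             coloring[node] = -1  # No color assigned
--     return coloring
-- ===== SOURCE B (Python) =====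
-- def decode_coloring(spins: list[bool], n_nodes: int, n_colors: int) -> dict[int, int]:
--     """Decode spin assignment back to graph coloring (color-major, first assignment wins)."""
--     coloring = {node: -1 for node in range(n_nodes)}
--     if not coloring:
--         return coloring
--     for c in range(n_colors):
--         for node in range(n_nodes):
--             if coloring[node] == -1 and spins[node * n_colors + c]:
--                 coloring[node] = c
--     return coloring
-- ===== Notes on version B (the rewrite author's own statement) =====
-- stated objective: alternative
-- what changed: Transposed the nested traversal from node-major (collect a colors_active list per node, take its head) to color-major over a table pre-initialized to -1, where the first color that fires on a still-unassigned node wins; no per-node list is built.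
import Mathlib
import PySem

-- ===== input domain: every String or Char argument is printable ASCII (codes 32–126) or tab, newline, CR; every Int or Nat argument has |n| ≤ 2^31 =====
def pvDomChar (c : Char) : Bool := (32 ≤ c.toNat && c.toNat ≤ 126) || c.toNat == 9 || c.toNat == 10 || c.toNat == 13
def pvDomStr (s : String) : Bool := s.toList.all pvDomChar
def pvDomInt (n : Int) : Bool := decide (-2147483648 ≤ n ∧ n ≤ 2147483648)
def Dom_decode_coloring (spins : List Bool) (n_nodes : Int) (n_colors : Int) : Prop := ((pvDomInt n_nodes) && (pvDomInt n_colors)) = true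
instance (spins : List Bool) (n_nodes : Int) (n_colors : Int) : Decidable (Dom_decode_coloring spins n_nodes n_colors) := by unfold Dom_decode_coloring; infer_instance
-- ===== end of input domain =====

-- B transposes the nested traversal to color-major with first-assignment-wins over a table
-- pre-initialized to -1; same dict (same keys, values and insertion order), no speed claim.

-- ===== PORT A =====
def decode_coloring (spins : List Bool) (n_nodes : Int) (n_colors : Int) : List (Int × Int) :=
  ((PySem.List.pyRange 0 n_nodes 1).foldl (fun (coloring : PySem.Dict Int Int) node =>
      let colors_active : List Int :=
        (PySem.List.pyRange 0 n_colors 1).foldl (fun acc c =>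
          if PySem.List.pyGetD spins (node * n_colors + c) false then acc ++ [c] else acc) []
      if colors_active ≠ [] then coloring.insert node colors_active.headI
      else coloring.insert node (-1)) PySem.Dict.empty).items

-- ===== PORT B =====
def decode_coloring_alt (spins : List Bool) (n_nodes : Int) (n_colors : Int) : List (Int × Int) :=
  let init : PySem.Dict Int Int :=
    (PySem.List.pyRange 0 n_nodes 1).foldl (fun coloring node => coloring.insert node (-1)) PySem.Dict.empty
  if init.items = [] then init.items else
  ((PySem.List.pyRange 0 n_colors 1).foldl (fun coloring c =>
      (PySem.List.pyRange 0 n_nodes 1).foldl (fun coloring node =>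
        if coloring.getD node (-1) == -1 && PySem.List.pyGetD spins (node * n_colors + c) false
        then coloring.insert node c else coloring) coloring) init).items

-- ===== PRECONDITION & SPEC =====
-- Pre_ excludes exactly the inputs where Python A raises IndexError: a positive grid that
-- needs more spins than the list holds (max accessed index is n_nodes*n_colors - 1).
def Pre_decode_coloring (spins : List Bool) (n_nodes : Int) (n_colors : Int) : Prop :=
  n_nodes ≤ 0 ∨ n_colors ≤ 0 ∨ n_nodes * n_colors ≤ (spins.length : Int)
instance (spins : List Bool) (n_nodes : Int) (n_colors : Int) : Decidable (Pre_decode_coloring spins n_nodes n_colors) := by unfold Pre_decode_coloring; infer_instance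
def pvWitness_decode_coloring : List Bool × Int × Int := ([true, false, false, true], 2, 2)

def Spec_decode_coloring (spins : List Bool) (n_nodes : Int) (n_colors : Int) (out : List (Int × Int)) : Prop := out = decode_coloring_alt spins n_nodes n_colors
instance (spins : List Bool) (n_nodes : Int) (n_colors : Int) (out : List (Int × Int)) : Decidable (Spec_decode_coloring spins n_nodes n_colors out) := by unfold Spec_decode_coloring; infer_instance

-- ===== CLAIM (what is proved, stated in full; the proofs are below) =====
def Claim_equal_decode_coloring : Prop := ∀ (spins : List Bool) (n_nodes : Int) (n_colors : Int), Dom_decode_coloring spins n_nodes n_colors → Pre_decode_coloring spins n_nodes n_colors → Spec_decode_coloring spins n_nodes n_colors (decode_coloring spins n_nodes n_colors)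

-- ===== LEMMAS AND PROOFS =====

-- spins[node*n_colors+c] as a Bool (out-of-range reads as false; inside Pre_ every read is in range)
def pvAct (spins : List Bool) (nc node c : Int) : Bool :=
  PySem.List.pyGetD spins (node * nc + c) false

-- B's per-node value update for one color
def pvStep (spins : List Bool) (nc node v c : Int) : Int :=
  if v == -1 && pvAct spins nc node c then c else v

-- B's inner-loop body
def pvBStep (spins : List Bool) (nc c : Int) (col : PySem.Dict Int Int) (node : Int) : PySem.Dict Int Int :=
  if col.getD node (-1) == -1 && PySem.List.pyGetD spins (node * nc + c) false
  then col.insert node c else col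

theorem pvStay (spins : List Bool) (nc node : Int) (cs : List Int) (v : Int) (h : v ≠ -1) :
    cs.foldl (pvStep spins nc node) v = v := by
  induction cs with
  | nil => rfl
  | cons c cs ih =>
    have hv : pvStep spins nc node v c = v := by simp [pvStep, h]
    rw [List.foldl_cons, hv, ih]

theorem pvValHeadD (spins : List Bool) (nc node : Int) (cs : List Int)
    (h : ∀ c ∈ cs, c ≠ -1) :
    cs.foldl (pvStep spins nc node) (-1) = (cs.filter (pvAct spins nc node)).headD (-1) := by
  induction cs with
  | nil => rfl
  | cons c cs ih =>
    by_cases hA : pvAct spins nc node c = true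
    · simp only [List.foldl_cons, List.filter_cons, hA, if_pos]
      have : pvStep spins nc node (-1) c = c := by simp [pvStep, hA]
      rw [this, pvStay spins nc node cs c (h c (List.mem_cons_self))]
      rfl
    · simp only [List.foldl_cons, List.filter_cons, hA]
      have : pvStep spins nc node (-1) c = -1 := by simp [pvStep, hA]
      rw [this]
      simpa using ih (fun x hx => h x (List.mem_cons_of_mem _ hx))

theorem pvAItems (spins : List Bool) (n_nodes n_colors : Int) :
    decode_coloring spins n_nodes n_colors
    = (PySem.List.pyRange 0 n_nodes 1).map (fun node =>
        (node, ((PySem.List.pyRange 0 n_colors 1).filter (pvAct spins n_colors node)).headD (-1))) := by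
  unfold decode_coloring
  have hf : (fun (coloring : PySem.Dict Int Int) node =>
      let colors_active : List Int :=
        (PySem.List.pyRange 0 n_colors 1).foldl (fun acc c =>
          if PySem.List.pyGetD spins (node * n_colors + c) false then acc ++ [c] else acc) []
      if colors_active ≠ [] then coloring.insert node colors_active.headI
      else coloring.insert node (-1))
      = (fun (coloring : PySem.Dict Int Int) node =>
          coloring.insert node
            (((PySem.List.pyRange 0 n_colors 1).filter (pvAct spins n_colors node)).headD (-1))) := by
    funext coloring node
    have hfold : (PySem.List.pyRange 0 n_colors 1).foldl (fun acc c =>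
        if PySem.List.pyGetD spins (node * n_colors + c) false then acc ++ [c] else acc) []
        = (PySem.List.pyRange 0 n_colors 1).filter (pvAct spins n_colors node) := by
      have := PySem.List.foldl_append_if (fun c => PySem.List.pyGetD spins (node * n_colors + c) false)
        (fun c : Int => c) (PySem.List.pyRange 0 n_colors 1) []
      simpa [pvAct] using this
    simp only [hfold]
    cases h : (PySem.List.pyRange 0 n_colors 1).filter (pvAct spins n_colors node) with
    | nil => simp
    | cons a l => simp [List.headI, List.headD]
  rw [hf]
  have := PySem.Dict.items_foldl_insert_fresh (PySem.List.pyRange 0 n_nodes 1)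
    (fun node : Int => node)
    (fun node => ((PySem.List.pyRange 0 n_colors 1).filter (pvAct spins n_colors node)).headD (-1))
    PySem.Dict.empty (by intro a _; simp [pysem]) (by simpa using PySem.List.nodup_pyRange_one 0 n_nodes)
  rw [this]
  simp [PySem.Dict.empty]

theorem pvGetMkAppend (pre rest : List (Int × Int)) (x : Int) (h : ∀ p ∈ pre, p.1 ≠ x) :
    (PySem.Dict.mk (pre ++ rest)).get? x = (PySem.Dict.mk rest).get? x := by
  induction pre with
  | nil => rfl
  | cons p pre ih =>
    cases p with
    | mk k v =>
      rw [List.cons_append, PySem.Dict.get?_mk_cons]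
      have hk : (k == x) = false := by
        simpa using h (k, v) List.mem_cons_self
      rw [hk]
      simp only [Bool.false_eq_true, if_false]
      exact ih (fun q hq => h q (List.mem_cons_of_mem _ hq))

theorem pvMapKeep (l : List (Int × Int)) (x : Int) (v : Int) (h : ∀ p ∈ l, p.1 ≠ x) :
    l.map (fun p => if p.1 == x then (x, v) else p) = l := by
  have : ∀ p ∈ l, (fun p : Int × Int => if p.1 == x then (x, v) else p) p = id p := by
    intro p hp
    simp [h p hp]
  rw [List.map_congr_left this, List.map_id]

theorem pvInnerFold (spins : List Bool) (nc c : Int) (ns : List Int) :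
    ∀ (pre : List (Int × Int)) (f : Int → Int), ns.Nodup → (∀ p ∈ pre, p.1 ∉ ns) →
    ns.foldl (pvBStep spins nc c) (PySem.Dict.mk (pre ++ ns.map (fun x => (x, f x))))
    = PySem.Dict.mk (pre ++ ns.map (fun x => (x, pvStep spins nc x (f x) c))) := by
  induction ns with
  | nil => intro pre f _ _; rfl
  | cons x xs ih =>
    intro pre f hnd hdis
    have hxnx : x ∉ xs := (List.nodup_cons.mp hnd).1
    have hget : (PySem.Dict.mk (pre ++ (x, f x) :: xs.map (fun y => (y, f y)))).getD x (-1) = f x := by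
      rw [PySem.Dict.getD_eq_get?_getD,
        pvGetMkAppend pre _ x (fun p hp => by
          intro he; exact hdis p hp (he ▸ List.mem_cons_self)),
        PySem.Dict.get?_mk_cons]
      simp
    simp only [List.map_cons, List.foldl_cons]
    by_cases hc : (f x == -1 && pvAct spins nc x c) = true
    · -- the entry for x is overwritten in place with c
      have hcont : (PySem.Dict.mk (pre ++ (x, f x) :: xs.map (fun y => (y, f y)))).contains x = true := by
        simp only [PySem.Dict.contains, List.any_eq_true]
        exact ⟨(x, f x), by simp, by simp⟩
      have hstep : pvBStep spins nc c (PySem.Dict.mk (pre ++ (x, f x) :: xs.map (fun y => (y, f y)))) x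
          = PySem.Dict.mk ((pre ++ [(x, c)]) ++ xs.map (fun y => (y, f y))) := by
        unfold pvBStep
        rw [hget]
        simp only [pvAct] at hc
        rw [if_pos hc]
        have := PySem.Dict.items_insert_of_contains
          (PySem.Dict.mk (pre ++ (x, f x) :: xs.map (fun y => (y, f y)))) c hcont
        apply PySem.Dict.ext
        rw [this]
        simp only [List.map_append, List.map_cons]
        rw [pvMapKeep pre x c (fun p hp => by
            intro he; exact hdis p hp (he ▸ List.mem_cons_self)),
          pvMapKeep (xs.map (fun y => (y, f y))) x c (by
            intro p hp
            obtain ⟨y, hy, rfl⟩ := List.mem_map.mp hp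
            intro he; exact hxnx (he ▸ hy))]
        simp
      rw [hstep]
      have hdis' : ∀ p ∈ pre ++ [(x, c)], p.1 ∉ xs := by
        intro p hp
        rcases List.mem_append.mp hp with h1 | h1
        · exact fun hm => hdis p h1 (List.mem_cons_of_mem _ hm)
        · simp at h1; subst h1; exact hxnx
      rw [ih (pre ++ [(x, c)]) f (List.nodup_cons.mp hnd).2 hdis']
      have hsx : pvStep spins nc x (f x) c = c := by simp [pvStep, hc]
      simp [hsx]
    · -- the entry for x stays f x
      have hstep : pvBStep spins nc c (PySem.Dict.mk (pre ++ (x, f x) :: xs.map (fun y => (y, f y)))) x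
          = PySem.Dict.mk ((pre ++ [(x, f x)]) ++ xs.map (fun y => (y, f y))) := by
        unfold pvBStep
        rw [hget]
        simp only [pvAct] at hc
        rw [if_neg hc]
        simp
      rw [hstep]
      have hdis' : ∀ p ∈ pre ++ [(x, f x)], p.1 ∉ xs := by
        intro p hp
        rcases List.mem_append.mp hp with h1 | h1
        · exact fun hm => hdis p h1 (List.mem_cons_of_mem _ hm)
        · simp at h1; subst h1; exact hxnx
      rw [ih (pre ++ [(x, f x)]) f (List.nodup_cons.mp hnd).2 hdis']
      have hsx : pvStep spins nc x (f x) c = f x := by simp only [pvStep]; rw [if_neg hc]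
      simp [hsx]

theorem pvOuterFold (spins : List Bool) (nc : Int) (ns : List Int) (hnd : ns.Nodup) (cs : List Int) :
    ∀ (f : Int → Int),
    cs.foldl (fun col c => ns.foldl (pvBStep spins nc c) col)
      (PySem.Dict.mk (ns.map (fun x => (x, f x))))
    = PySem.Dict.mk (ns.map (fun x => (x, cs.foldl (pvStep spins nc x) (f x)))) := by
  induction cs with
  | nil => intro f; rfl
  | cons c cs ih =>
    intro f
    simp only [List.foldl_cons]
    have := pvInnerFold spins nc c ns [] f hnd (by simp)
    simp only [List.nil_append] at this
    rw [this, ih (fun x => pvStep spins nc x (f x) c)]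

theorem pvBItems (spins : List Bool) (n_nodes n_colors : Int) :
    decode_coloring_alt spins n_nodes n_colors
    = (PySem.List.pyRange 0 n_nodes 1).map (fun node =>
        (node, (PySem.List.pyRange 0 n_colors 1).foldl (pvStep spins n_colors node) (-1))) := by
  unfold decode_coloring_alt
  have hinit : (PySem.List.pyRange 0 n_nodes 1).foldl
      (fun (coloring : PySem.Dict Int Int) node => coloring.insert node (-1)) PySem.Dict.empty
      = PySem.Dict.mk ((PySem.List.pyRange 0 n_nodes 1).map (fun x => (x, (-1 : Int)))) := by
    apply PySem.Dict.ext
    have := PySem.Dict.items_foldl_insert_fresh (PySem.List.pyRange 0 n_nodes 1)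
      (fun node : Int => node) (fun _ => (-1 : Int)) PySem.Dict.empty
      (by intro a _; simp [pysem]) (by simpa using PySem.List.nodup_pyRange_one 0 n_nodes)
    rw [PySem.Dict.items] at this ⊢
    rw [this]
    simp [PySem.Dict.empty]
  rw [hinit]
  by_cases hnil : (PySem.List.pyRange 0 n_nodes 1).map (fun x => (x, (-1 : Int))) = []
  · have : PySem.List.pyRange 0 n_nodes 1 = [] := List.map_eq_nil_iff.mp hnil
    simp [this]
  · rw [if_neg (by simpa [PySem.Dict.items] using hnil)]
    have houter := pvOuterFold spins n_colors (PySem.List.pyRange 0 n_nodes 1)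
      (PySem.List.nodup_pyRange_one 0 n_nodes) (PySem.List.pyRange 0 n_colors 1) (fun _ => (-1 : Int))
    show ((PySem.List.pyRange 0 n_colors 1).foldl (fun coloring c =>
        (PySem.List.pyRange 0 n_nodes 1).foldl (pvBStep spins n_colors c) coloring)
        (PySem.Dict.mk ((PySem.List.pyRange 0 n_nodes 1).map (fun x => (x, (-1 : Int)))))).items = _
    rw [houter]

-- ===== VERDICT (by name: the statement is the Claim_ definition above) =====
theorem decode_coloring_spec : Claim_equal_decode_coloring := by
  intro spins n_nodes n_colors _ _
  unfold Spec_decode_coloring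
  rw [pvAItems, pvBItems]
  apply List.map_congr_left
  intro node _
  rw [pvValHeadD spins n_colors node (PySem.List.pyRange 0 n_colors 1)
    (fun c hc => by
      have := (PySem.List.mem_pyRange_one.mp hc).1
      omega)]
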